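-- pv_equiv track=rewrite | github.com/subrotonpi/clone_evaluation | data/gptcb_cross/gptcb_cross/None/97.py | solution
-- ===== SOURCE A (Python) =====
-- def solution(X, A):
--     unique_elements = set()
--     sum1 = 0
--     sum2 = 0
--     for i in range(0, X+1):
--         sum1 += i
--     for i in range(0, len(A)):
--         if A[i] in unique_elements:
--             continue
--         unique_elements.add(A[i])
--         sum2 += A[i]
--         if sum1 == sum2:
--             return i
--     return -1
-- ===== SOURCE B (Python) =====
-- def solution(X, A):
--     # target = 0 + 1 + ... + X computed in closed form (0 when X < 0, as the sum is empty)
--     target = X * (X + 1) // 2 if X >= 0 else 0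
--     seen = set()
--     total = 0
--     for i, a in enumerate(A):
--         if a not in seen:
--             seen.add(a)
--             total += a
--             if total == target:
--                 return i
--     return -1
-- ===== Notes on version B (the rewrite author's own statement) =====
-- stated objective: alternative
-- what changed: Replaces A's O(X) loop that sums 0..X with the closed form X*(X+1)//2 and walks A via enumerate instead of indexing range(len(A)); the scan over A keeps the same cost.
import Mathlib
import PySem

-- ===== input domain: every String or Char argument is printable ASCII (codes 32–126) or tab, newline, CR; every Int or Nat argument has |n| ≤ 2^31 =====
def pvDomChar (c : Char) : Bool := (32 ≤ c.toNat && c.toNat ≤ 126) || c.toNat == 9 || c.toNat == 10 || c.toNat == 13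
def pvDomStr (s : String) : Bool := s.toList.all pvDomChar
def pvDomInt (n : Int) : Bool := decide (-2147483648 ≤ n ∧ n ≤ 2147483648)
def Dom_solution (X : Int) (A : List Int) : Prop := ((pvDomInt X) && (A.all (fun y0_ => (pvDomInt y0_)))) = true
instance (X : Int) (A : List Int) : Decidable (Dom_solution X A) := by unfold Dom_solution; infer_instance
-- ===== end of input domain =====

-- B replaces A's summation loop over range(X+1) by the closed form X*(X+1)//2 and enumerates A directly (objective: alternative).


-- ===== PORT A =====
-- A's second loop: for i in range(0, len(A)) with early return; A[i] is always in
-- range (i < len(A)), so pyGetD with default 0 is exact here.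
def solutionLoop (A : List Int) (sum1 : Int) : List Int → PySem.Set Int → Int → Int
  | [], _, _ => -1
  | i :: rest, s, sum2 =>
    let a := PySem.List.pyGetD A i 0
    if PySem.Set.contains s a then solutionLoop A sum1 rest s sum2
    else if sum1 = sum2 + a then i
    else solutionLoop A sum1 rest (PySem.Set.add s a) (sum2 + a)

def solution (X : Int) (A : List Int) : Int :=
  let sum1 := (PySem.List.pyRange 0 (X + 1) 1).foldl (fun s i => s + i) 0
  solutionLoop A sum1 (PySem.List.pyRange 0 (A.length : Int) 1) PySem.Set.empty 0

-- ===== PORT B =====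
-- B's single pass: for i, a in enumerate(A) with early return.
def solutionAltLoop (target : Int) : List (Int × Int) → PySem.Set Int → Int → Int
  | [], _, _ => -1
  | (i, a) :: rest, s, total =>
    if ¬ PySem.Set.contains s a then
      if total + a = target then i
      else solutionAltLoop target rest (PySem.Set.add s a) (total + a)
    else solutionAltLoop target rest s total

def solution_alt (X : Int) (A : List Int) : Int :=
  let target := if X ≥ 0 then PySem.Int.floordiv (X * (X + 1)) 2 else 0
  solutionAltLoop target (PySem.List.enumerate A 0) PySem.Set.empty 0

-- ===== PRECONDITION & SPEC =====
def Spec_solution (X : Int) (A : List Int) (out : Int) : Prop := out = solution_alt X A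
instance (X : Int) (A : List Int) (out : Int) : Decidable (Spec_solution X A out) := by unfold Spec_solution; infer_instance

-- ===== CLAIM (what is proved, stated in full; the proofs are below) =====
def Claim_equal_solution : Prop := ∀ (X : Int) (A : List Int), Dom_solution X A → Spec_solution X A (solution X A)

-- ===== LEMMAS AND PROOFS =====

-- 2 * (0 + 1 + ... + (n-1)) = n * (n - 1)
lemma two_mul_sum_pyRange (n : Nat) :
    2 * (PySem.List.pyRange 0 (n : Int) 1).foldl (fun s i => s + i) 0 = (n : Int) * ((n : Int) - 1) := by
  induction n with
  | zero => simp [PySem.List.pyRange_one_eq_nil]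
  | succ m ih =>
    have h : ((m : Int) + 1) = ((m + 1 : Nat) : Int) := by push_cast; ring
    rw [show ((m + 1 : Nat) : Int) = (m : Int) + 1 by push_cast; ring,
        PySem.List.pyRange_one_succ_right (a := 0) (b := (m : Int)) (by positivity)]
    rw [List.foldl_append]
    simp only [List.foldl]
    nlinarith [ih]

lemma sum1_eq_target (X : Int) :
    (PySem.List.pyRange 0 (X + 1) 1).foldl (fun s i => s + i) 0
      = (if X ≥ 0 then PySem.Int.floordiv (X * (X + 1)) 2 else 0) := by
  by_cases hX : X ≥ 0
  · simp only [hX, if_pos]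
    have h2 := two_mul_sum_pyRange (X + 1).toNat
    rw [show (((X + 1).toNat : Nat) : Int) = X + 1 by omega] at h2
    rw [show (X + 1) * (X + 1 - 1) = X * (X + 1) by ring] at h2
    rw [PySem.Int.floordiv_eq_ediv_of_pos (by norm_num)]
    omega
  · simp only [hX, if_neg, not_false_iff]
    rw [PySem.List.pyRange_one_eq_nil (by omega)]
    simp

-- the two scanning loops agree: A indexes via range(len(A)), B walks enumerate(A)
lemma loops_eq (A : List Int) (sum1 : Int) :
    ∀ (m k : Nat), A.length - k = m → ∀ (s : PySem.Set Int) (t : Int),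
      solutionLoop A sum1 (PySem.List.pyRange (k : Int) (A.length : Int) 1) s t
        = solutionAltLoop sum1 (PySem.List.enumerate (A.drop k) (k : Int)) s t := by
  intro m
  induction m with
  | zero =>
    intro k hk s t
    have hk' : A.length ≤ k := by omega
    rw [PySem.List.pyRange_one_eq_nil (by exact_mod_cast hk'),
        List.drop_eq_nil_of_le hk']
    simp [solutionLoop, solutionAltLoop, PySem.List.enumerate]
  | succ m ih =>
    intro k hk s t
    have hlt : k < A.length := by omega
    rw [PySem.List.pyRange_one_cons (by exact_mod_cast hlt)]
    have hdrop : A.drop k = A[k] :: A.drop (k + 1) := (List.getElem_cons_drop hlt).symm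
    rw [hdrop, PySem.List.enumerate_cons]
    simp only [solutionLoop, solutionAltLoop]
    have hget : PySem.List.pyGetD A (k : Int) 0 = A[k] := by
      rw [PySem.List.pyGetD_natCast]; exact List.getD_eq_getElem A 0 hlt
    rw [hget]
    have hcast : (k : Int) + 1 = ((k + 1 : Nat) : Int) := by push_cast; ring
    by_cases hc : PySem.Set.contains s A[k]
    · simp only [hc, if_true, not_true, if_false]
      rw [hcast]; exact ih (k + 1) (by omega) s t
    · simp only [hc]
      by_cases he : t + A[k] = sum1
      · simp [he]
      · have he' : ¬ sum1 = t + A[k] := fun h => he h.symm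
        simp only [he, he', if_false]
        rw [hcast]; exact ih (k + 1) (by omega) (PySem.Set.add s A[k]) (t + A[k])

-- ===== VERDICT (by name: the statement is the Claim_ definition above) =====
theorem solution_spec : Claim_equal_solution := by
  intro X A _
  unfold Spec_solution solution solution_alt
  rw [sum1_eq_target]
  have := loops_eq A (if X ≥ 0 then PySem.Int.floordiv (X * (X + 1)) 2 else 0)
    A.length 0 (by omega) PySem.Set.empty 0
  simpa using this
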